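-- pv_equiv track=rewrite | github.com/whitepaper2/algoDiary | daily-question/20210922_trieTree.py | getPrefixCnts
-- ===== SOURCE A (Python) =====
-- def getPrefixCnts(words, prefix):
--     """
--     遍历法，1.求出所有前缀集合，2.前缀出现的次数求和
--     :param words:
--     :param prefix:
--     :return:
--     """
--     preWords = list()
--     for i, s in enumerate(prefix):
--         if i == 0:
--             preWords.append(prefix[0])
--         else:
--             preWords.append(preWords[-1] + s)
--     from collections import Counter
--     wordDict = Counter(words)
--     res = 0
--     for s in preWords:
--         res += wordDict[s]
--     return res
-- ===== SOURCE B (Python) =====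
-- def getPrefixCnts(words, prefix):
--     return sum(1 for w in words if w and prefix.startswith(w))
-- ===== Notes on version B (the rewrite author's own statement) =====
-- stated objective: simpler
-- what changed: Drops the prefix list and the Counter entirely: one pass over words counting each word that is a non-empty prefix of the query string (each word can equal at most one prefix, so per-word counting equals the Counter sum).
import Mathlib
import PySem

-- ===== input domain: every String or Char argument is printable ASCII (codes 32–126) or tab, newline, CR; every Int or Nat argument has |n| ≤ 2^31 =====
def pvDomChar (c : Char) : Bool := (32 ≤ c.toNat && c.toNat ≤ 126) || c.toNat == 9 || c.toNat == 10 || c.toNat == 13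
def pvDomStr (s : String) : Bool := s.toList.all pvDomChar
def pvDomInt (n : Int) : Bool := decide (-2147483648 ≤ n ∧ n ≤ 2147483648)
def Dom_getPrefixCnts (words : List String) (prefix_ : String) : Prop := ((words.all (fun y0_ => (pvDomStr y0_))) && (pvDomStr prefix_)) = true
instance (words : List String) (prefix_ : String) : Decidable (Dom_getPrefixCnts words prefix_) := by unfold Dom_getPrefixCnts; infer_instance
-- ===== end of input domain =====

-- B replaces A's prefix-list + Counter with one pass over words counting non-empty prefixes of the query (simpler).


-- ===== PORT A =====
-- A's loop body: 'if i == 0: preWords.append(prefix[0]) else: preWords.append(preWords[-1] + s)'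
def pvStepA (p : List Char) (pw : List (List Char)) (q : Int × Char) : List (List Char) :=
  if q.1 = 0 then pw ++ [[PySem.List.pyGetD p 0 ' ']]
  else pw ++ [PySem.List.pyGetD pw (-1) [] ++ [q.2]]

def getPrefixCnts (words : List String) (prefix_ : String) : Int :=
  let p := prefix_.toList
  let preWords := (PySem.List.enumerate p 0).foldl (pvStepA p) []
  let wordDict := PySem.Dict.counter (words.map String.toList)
  preWords.foldl (fun res s => res + wordDict.getD s 0) 0

-- ===== PORT B =====
def getPrefixCnts_alt (words : List String) (prefix_ : String) : Int :=
  words.foldl (fun acc w => if (w != "") && PySem.Str.startswith prefix_ w then acc + 1 else acc) 0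

-- ===== PRECONDITION & SPEC =====
def Spec_getPrefixCnts (words : List String) (prefix_ : String) (out : Int) : Prop := out = getPrefixCnts_alt words prefix_
instance (words : List String) (prefix_ : String) (out : Int) : Decidable (Spec_getPrefixCnts words prefix_ out) := by unfold Spec_getPrefixCnts; infer_instance

-- ===== CLAIM (what is proved, stated in full; the proofs are below) =====
def Claim_equal_getPrefixCnts : Prop := ∀ (words : List String) (prefix_ : String), Dom_getPrefixCnts words prefix_ → Spec_getPrefixCnts words prefix_ (getPrefixCnts words prefix_)

-- ===== LEMMAS AND PROOFS =====

/-- The prefixes that A's first loop collects: p[:1], p[:2], …, p[:len p]. -/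
def pvPrefixes (p : List Char) : List (List Char) := (List.range p.length).map (fun k => p.take (k + 1))

/-- What A's loop appends after the first step, starting from accumulated prefix `a`. -/
def pvBuild (a : List Char) : List Char → List (List Char)
  | [] => []
  | c :: cs => (a ++ [c]) :: pvBuild (a ++ [c]) cs

theorem pvBuild_eq (cs : List Char) : ∀ a, pvBuild a cs = (List.range cs.length).map (fun k => a ++ cs.take (k + 1)) := by
  induction cs with
  | nil => intro a; rfl
  | cons c cs ih =>
    intro a
    simp [pvBuild, ih (a ++ [c]), List.range_succ_eq_map, List.map_map, Function.comp_def]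

theorem pvFoldA (p : List Char) (cs : List Char) : ∀ (j : Int) (pw : List (List Char)) (h : pw ≠ []), 1 ≤ j →
    (PySem.List.enumerate cs j).foldl (pvStepA p) pw = pw ++ pvBuild (pw.getLast h) cs := by
  induction cs with
  | nil => intro j pw h hj; simp [PySem.List.enumerate_nil, pvBuild]
  | cons c cs ih =>
    intro j pw h hj
    rw [PySem.List.enumerate_cons, List.foldl_cons]
    have hstep : pvStepA p pw (j, c) = pw ++ [pw.getLast h ++ [c]] := by
      unfold pvStepA
      rw [if_neg (by simp; omega)]
      rw [PySem.List.pyGetD_neg_one pw [] h]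
    rw [hstep, ih (j + 1) _ (by simp) (by omega)]
    rw [List.getLast_concat]
    simp [pvBuild]

theorem pvPreWords_eq (p : List Char) : (PySem.List.enumerate p 0).foldl (pvStepA p) [] = pvPrefixes p := by
  cases p with
  | nil => rfl
  | cons c cs =>
    rw [PySem.List.enumerate_cons, List.foldl_cons]
    have hstep : pvStepA (c :: cs) [] ((0 : Int), c) = [[c]] := by
      simp [pvStepA, PySem.List.pyGetD_zero_cons]
    rw [hstep, show (0 : Int) + 1 = 1 from rfl,
      pvFoldA (c :: cs) cs 1 [[c]] (by simp) le_rfl]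
    simp only [List.getLast_singleton]
    rw [pvBuild_eq]
    simp [pvPrefixes, List.range_succ_eq_map, List.map_map, Function.comp_def]

theorem pvMem_prefixes (p s : List Char) : s ∈ pvPrefixes p ↔ s ≠ [] ∧ s <+: p := by
  constructor
  · rintro hm
    simp only [pvPrefixes, List.mem_map, List.mem_range] at hm
    obtain ⟨k, hk, rfl⟩ := hm
    refine ⟨?_, List.take_prefix _ _⟩
    have hl : (p.take (k + 1)).length = k + 1 := by rw [List.length_take]; omega
    intro hnil; rw [hnil] at hl; simp at hl
  · rintro ⟨hne, hpre⟩
    have hlen : s.length ≤ p.length := hpre.length_le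
    have hpos : 0 < s.length := List.length_pos_iff.mpr hne
    have htake : s = p.take s.length := List.prefix_iff_eq_take.mp hpre
    simp only [pvPrefixes, List.mem_map, List.mem_range]
    refine ⟨s.length - 1, by omega, ?_⟩
    rw [show s.length - 1 + 1 = s.length from by omega]
    exact htake.symm

theorem pvNodup_prefixes (p : List Char) : (pvPrefixes p).Nodup := by
  refine List.Nodup.map_on ?_ (List.nodup_range)
  intro a ha b hb hab
  simp only [List.mem_range] at ha hb
  have la : (p.take (a + 1)).length = a + 1 := by rw [List.length_take]; omega
  have lb : (p.take (b + 1)).length = b + 1 := by rw [List.length_take]; omega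
  have := la ▸ lb ▸ congrArg List.length hab
  omega

theorem pvFoldl_add {α : Type} (S : List α) (g : α → Int) : ∀ a : Int, S.foldl (fun r s => r + g s) a = a + (S.map g).sum := by
  induction S with
  | nil => intro a; simp
  | cons x xs ih => intro a; simp [ih]; ring

theorem pvFoldl_countP {α : Type} (L : List α) (pred : α → Bool) : ∀ a : Int, L.foldl (fun acc w => if pred w then acc + 1 else acc) a = a + (L.countP pred : Int) := by
  induction L with
  | nil => intro a; simp
  | cons w L ih =>
    intro a
    rw [List.foldl_cons, List.countP_cons]
    by_cases h : pred w = true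
    · simp only [h, if_true, ih]; push_cast; ring
    · simp only [h, ih]; push_cast; ring

theorem pvSum_indicator (w : List Char) (S : List (List Char)) (hS : S.Nodup) :
    (S.map (fun s => if s = w then (1:Int) else 0)).sum = if w ∈ S then 1 else 0 := by
  induction S with
  | nil => simp
  | cons t S ihS =>
    have hnotin := (List.nodup_cons.mp hS).1
    have hrec := ihS (List.nodup_cons.mp hS).2
    by_cases htw : t = w
    · subst htw
      have hz : (S.map (fun s => if s = t then (1:Int) else 0)).sum = 0 := by
        apply List.sum_eq_zero; intro x hx
        simp only [List.mem_map] at hx; obtain ⟨s, hs, rfl⟩ := hx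
        simp [show s ≠ t from fun h => hnotin (h ▸ hs)]
      simp [hz]
    · have hmem : w ∈ t :: S ↔ w ∈ S := by simp [Ne.symm htw]
      simp only [List.map_cons, List.sum_cons, if_neg htw, hrec, zero_add]
      by_cases hw : w ∈ S <;> simp [hw, hmem]

theorem pvSum_counts (L : List (List Char)) (S : List (List Char)) (hS : S.Nodup) :
    (S.map (fun s => (L.count s : Int))).sum = (L.countP (fun w => decide (w ∈ S)) : Int) := by
  induction L with
  | nil => simp
  | cons w L ih =>
    rw [List.countP_cons]
    have hcnt : ∀ s : List Char, ((w :: L).count s : Int) = (L.count s : Int) + (if s = w then 1 else 0) := by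
      intro s
      rw [List.count_cons]
      by_cases h : s = w
      · simp [h]
      · have h' : ¬ w = s := fun hh => h hh.symm
        simp [h, h']
    calc (S.map (fun s => ((w :: L).count s : Int))).sum
        = ((S.map (fun s => ((L.count s : Int) + if s = w then (1:Int) else 0))).sum) := by
          exact congrArg List.sum (List.map_congr_left (fun s _ => hcnt s))
      _ = (S.map (fun s => (L.count s : Int))).sum + (S.map (fun s => if s = w then (1:Int) else 0)).sum := by
          rw [← List.sum_map_add]
      _ = (L.countP (fun w => decide (w ∈ S)) : Int) + (if w ∈ S then 1 else 0) := by
          rw [ih, pvSum_indicator w S hS]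
      _ = _ := by by_cases hw : w ∈ S <;> simp [hw]

theorem pvCond_iff (prefix_ : String) (w : String) :
    ((w != "") && PySem.Str.startswith prefix_ w) = true ↔ w.toList ∈ pvPrefixes prefix_.toList := by
  rw [pvMem_prefixes]
  simp only [Bool.and_eq_true, bne_iff_ne, ne_eq, PySem.Str.startswith_eq, PySem.Chars.startswith_iff]
  constructor
  · rintro ⟨h1, h2⟩
    exact ⟨fun h => h1 (String.toList_eq_nil_iff.mp h), h2⟩
  · rintro ⟨h1, h2⟩
    exact ⟨fun h => h1 (by rw [h]; rfl), h2⟩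

-- ===== VERDICT (by name: the statement is the Claim_ definition above) =====
theorem getPrefixCnts_spec : Claim_equal_getPrefixCnts := by
  intro words prefix_ _
  unfold Spec_getPrefixCnts getPrefixCnts getPrefixCnts_alt
  simp only
  rw [pvPreWords_eq]
  rw [pvFoldl_add]
  rw [show (List.map (fun s => (PySem.Dict.counter (words.map String.toList)).getD s 0) (pvPrefixes prefix_.toList))
      = (pvPrefixes prefix_.toList).map (fun s => ((words.map String.toList).count s : Int)) from
    List.map_congr_left (fun s _ => PySem.Dict.getD_counter _ s)]
  rw [pvSum_counts (words.map String.toList) (pvPrefixes prefix_.toList) (pvNodup_prefixes _)]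
  rw [pvFoldl_countP]
  simp only [zero_add, Int.natCast_inj]
  rw [List.countP_map]
  congr 1
  funext w
  simp only [Function.comp_def]
  by_cases h : w.toList ∈ pvPrefixes prefix_.toList
  · rw [decide_eq_true h, (pvCond_iff prefix_ w).mpr h]
  · rw [decide_eq_false h, Bool.eq_false_iff.mpr (fun hc => h ((pvCond_iff prefix_ w).mp hc))]
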